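-- pv_equiv track=rewrite | github.com/Ghost-Developmentx/cashly-ai | services/learning/conversation_analytics_service.py | _categorize_users_by_activity
-- ===== SOURCE A (Python) =====
-- from typing import Dict, List, Any
--
-- def _categorize_users_by_activity(
--     conversations_per_user: List[int],
-- ) -> Dict[str, int]:
--     """Categorize users by their activity level."""
--     if not conversations_per_user:
--         return {}
--
--     categories = {"one_time": 0, "occasional": 0, "regular": 0, "power_user": 0}
--
--     for count in conversations_per_user:
--         if count == 1:
--             categories["one_time"] += 1
--         elif count <= 3:
--             categories["occasional"] += 1
--         elif count <= 10:
--             categories["regular"] += 1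
--         else:
--             categories["power_user"] += 1
--
--     return categories
-- ===== SOURCE B (Python) =====
-- from typing import Dict, List, Any
--
-- def _categorize_users_by_activity(
--     conversations_per_user: List[int],
-- ) -> Dict[str, int]:
--     """Categorize users by their activity level (per-category counting passes)."""
--     if not conversations_per_user:
--         return {}
--     one_time = sum(1 for c in conversations_per_user if c == 1)
--     occasional = sum(1 for c in conversations_per_user if c != 1 and c <= 3)
--     regular = sum(1 for c in conversations_per_user if 3 < c <= 10)
--     power_user = len(conversations_per_user) - one_time - occasional - regular
--     return {
--         "one_time": one_time,
--         "occasional": occasional,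
--         "regular": regular,
--         "power_user": power_user,
--     }
-- ===== Notes on version B (the rewrite author's own statement) =====
-- stated objective: alternative
-- what changed: Replaces A's single loop that mutates a four-key dict via a four-way branch with four independent per-category counting passes (the power_user count obtained by subtraction from the length), assembled into the dict at the end.
import Mathlib
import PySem

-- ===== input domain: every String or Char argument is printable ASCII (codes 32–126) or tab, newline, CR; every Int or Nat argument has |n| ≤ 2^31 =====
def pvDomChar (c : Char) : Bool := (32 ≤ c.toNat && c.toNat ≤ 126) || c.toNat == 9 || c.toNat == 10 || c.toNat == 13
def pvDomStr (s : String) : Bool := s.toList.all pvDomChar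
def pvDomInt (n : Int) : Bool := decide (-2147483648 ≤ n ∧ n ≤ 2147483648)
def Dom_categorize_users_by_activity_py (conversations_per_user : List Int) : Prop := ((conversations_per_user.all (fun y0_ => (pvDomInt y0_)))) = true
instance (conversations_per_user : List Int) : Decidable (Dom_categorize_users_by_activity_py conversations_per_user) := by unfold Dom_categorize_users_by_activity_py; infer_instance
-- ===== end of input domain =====

-- B replaces A's single mutable-dict loop by four independent per-category counting
-- passes assembled into the result dict at the end (objective: alternative decomposition).

-- ===== PORT A =====
-- the loop body of A: the four-way branch incrementing the matching dict entry
def pvStepA (d : PySem.Dict String Int) (c : Int) : PySem.Dict String Int :=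
  if c == 1 then d.modify "one_time" 0 (· + 1)
  else if c ≤ 3 then d.modify "occasional" 0 (· + 1)
  else if c ≤ 10 then d.modify "regular" 0 (· + 1)
  else d.modify "power_user" 0 (· + 1)

def categorize_users_by_activity_py (conversations_per_user : List Int) : List (String × Int) :=
  if conversations_per_user = [] then []
  else
    (conversations_per_user.foldl pvStepA
      (PySem.Dict.mk [("one_time", (0 : Int)), ("occasional", 0), ("regular", 0), ("power_user", 0)])).items

-- ===== PORT B =====
def categorize_users_by_activity_py_alt (conversations_per_user : List Int) : List (String × Int) :=
  if conversations_per_user = [] then []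
  else
    let one_time : Int := conversations_per_user.countP (fun c => c == 1)
    let occasional : Int := conversations_per_user.countP (fun c => c != 1 && decide (c ≤ 3))
    let regular : Int := conversations_per_user.countP (fun c => decide (3 < c) && decide (c ≤ 10))
    let power_user : Int := (conversations_per_user.length : Int) - one_time - occasional - regular
    [("one_time", one_time), ("occasional", occasional), ("regular", regular), ("power_user", power_user)]

-- ===== PRECONDITION & SPEC =====
def Spec_categorize_users_by_activity_py (conversations_per_user : List Int) (out : List (String × Int)) : Prop := out = categorize_users_by_activity_py_alt conversations_per_user
instance (conversations_per_user : List Int) (out : List (String × Int)) : Decidable (Spec_categorize_users_by_activity_py conversations_per_user out) := by unfold Spec_categorize_users_by_activity_py; infer_instance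

-- ===== CLAIM (what is proved, stated in full; the proofs are below) =====
def Claim_equal_categorize_users_by_activity_py : Prop := ∀ (conversations_per_user : List Int), Dom_categorize_users_by_activity_py conversations_per_user → Spec_categorize_users_by_activity_py conversations_per_user (categorize_users_by_activity_py conversations_per_user)

-- ===== LEMMAS AND PROOFS =====

-- A's loop, from a generalized four-entry accumulator, adds the per-branch counts
lemma pv_loopA (xs : List Int) : ∀ (a b c d : Int),
    xs.foldl pvStepA
      (PySem.Dict.mk [("one_time", a), ("occasional", b), ("regular", c), ("power_user", d)])
    = PySem.Dict.mk
        [("one_time", a + xs.countP (fun c => c == 1)),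
         ("occasional", b + xs.countP (fun c => !(c == 1) && decide (c ≤ 3))),
         ("regular", c + xs.countP (fun c => !(c == 1) && !decide (c ≤ 3) && decide (c ≤ 10))),
         ("power_user", d + xs.countP (fun c => !(c == 1) && !decide (c ≤ 3) && !decide (c ≤ 10)))] := by
  induction xs with
  | nil => simp
  | cons x xs ih =>
    intro a b c d
    simp only [List.foldl_cons, List.countP_cons]
    by_cases h1 : x = 1
    · have : pvStepA (PySem.Dict.mk [("one_time", a), ("occasional", b), ("regular", c), ("power_user", d)]) x
          = PySem.Dict.mk [("one_time", a + 1), ("occasional", b), ("regular", c), ("power_user", d)] := by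
        simp [pvStepA, h1, PySem.Dict.modify, PySem.Dict.insert, PySem.Dict.getD, PySem.Dict.get?, PySem.Dict.contains]
      rw [this, ih]
      simp [h1]
      ring_nf
    · by_cases h2 : x ≤ 3
      · have : pvStepA (PySem.Dict.mk [("one_time", a), ("occasional", b), ("regular", c), ("power_user", d)]) x
            = PySem.Dict.mk [("one_time", a), ("occasional", b + 1), ("regular", c), ("power_user", d)] := by
          simp [pvStepA, h1, h2, PySem.Dict.modify, PySem.Dict.insert, PySem.Dict.getD, PySem.Dict.get?, PySem.Dict.contains]
        rw [this, ih]
        simp [h1, h2]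
        omega
      · by_cases h3 : x ≤ 10
        · have : pvStepA (PySem.Dict.mk [("one_time", a), ("occasional", b), ("regular", c), ("power_user", d)]) x
              = PySem.Dict.mk [("one_time", a), ("occasional", b), ("regular", c + 1), ("power_user", d)] := by
            simp [pvStepA, h1, h2, h3, PySem.Dict.modify, PySem.Dict.insert, PySem.Dict.getD, PySem.Dict.get?, PySem.Dict.contains]
          rw [this, ih]
          simp [h1, h2, h3]
          omega
        · have : pvStepA (PySem.Dict.mk [("one_time", a), ("occasional", b), ("regular", c), ("power_user", d)]) x
              = PySem.Dict.mk [("one_time", a), ("occasional", b), ("regular", c), ("power_user", d + 1)] := by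
            simp [pvStepA, h1, h2, h3, PySem.Dict.modify, PySem.Dict.insert, PySem.Dict.getD, PySem.Dict.get?, PySem.Dict.contains]
          rw [this, ih]
          simp [h1, h2, h3]
          omega

-- the four branch counts partition the list
lemma pv_partition (xs : List Int) :
    ((xs.countP (fun c => !(c == 1) && !decide (c ≤ 3) && !decide (c ≤ 10)) : Nat) : Int)
    = (xs.length : Int) - xs.countP (fun c => c == 1)
        - xs.countP (fun c => !(c == 1) && decide (c ≤ 3))
        - xs.countP (fun c => !(c == 1) && !decide (c ≤ 3) && decide (c ≤ 10)) := by
  induction xs with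
  | nil => simp
  | cons x xs ih =>
    simp only [List.countP_cons, List.length_cons]
    have h1 := List.countP_le_length (l := xs) (p := fun c => c == 1)
    have h2 := List.countP_le_length (l := xs) (p := fun c => !(c == 1) && decide (c ≤ 3))
    have h3 := List.countP_le_length (l := xs) (p := fun c => !(c == 1) && !decide (c ≤ 3) && decide (c ≤ 10))
    by_cases a1 : x = 1 <;> by_cases a2 : x ≤ 3 <;> by_cases a3 : x ≤ 10 <;>
      simp [a1, a2, a3] <;> omega

-- ===== VERDICT (by name: the statement is the Claim_ definition above) =====
theorem categorize_users_by_activity_py_spec : Claim_equal_categorize_users_by_activity_py := by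
  intro xs _
  unfold Spec_categorize_users_by_activity_py
  unfold categorize_users_by_activity_py categorize_users_by_activity_py_alt
  by_cases h : xs = []
  · simp [h]
  · simp only [if_neg h]
    rw [pv_loopA]
    simp only [zero_add]
    have hocc : xs.countP (fun c => !(c == 1) && decide (c ≤ 3))
        = xs.countP (fun c => c != 1 && decide (c ≤ 3)) := by
      apply List.countP_congr; intro c _; simp [bne]
    have hreg : xs.countP (fun c => !(c == 1) && !decide (c ≤ 3) && decide (c ≤ 10))
        = xs.countP (fun c => decide (3 < c) && decide (c ≤ 10)) := by
      apply List.countP_congr; intro c _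
      by_cases h1 : c = 1 <;> by_cases h2 : c ≤ 3 <;> by_cases h3 : (3:Int) < c <;>
        simp [h1, h2, h3] <;> omega
    rw [pv_partition, hocc, hreg]
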